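-- pv_equiv track=rewrite | github.com/Adam-Hoelscher/CodeFights.py | streamValidation.py | streamValidation
-- ===== SOURCE A (Python) =====
-- def streamValidation(stream):
--
--     if not stream:
--         return True
--
--     head = f"{stream[0]:08b}"
--     blocks = head.find('0')
--
--     if blocks == -1:
--         return False
--     elif blocks == 0:
--         return streamValidation(stream[1:])
--     elif blocks > len(stream):
--         return False
--     else:
--         tail = stream[1:blocks]
--         if not tail:
--             return False
--         for block in tail:
--             if f"{block:08b}"[:2] != '10':
--                 return False
--         return streamValidation(stream[blocks:])
-- ===== SOURCE B (Python) =====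
-- def streamValidation(stream):
--     i, n = 0, len(stream)
--     while i < n:
--         blocks = f"{stream[i]:08b}".find('0')
--         if blocks == -1 or blocks == 1 or blocks > n - i:
--             return False
--         if blocks == 0:
--             i += 1
--             continue
--         if any(f"{stream[j]:08b}"[:2] != '10' for j in range(i + 1, i + blocks)):
--             return False
--         i += blocks
--     return True
-- ===== Notes on version B (the rewrite author's own statement) =====
-- stated objective: alternative
-- what changed: Replaced A's recursion on suffix slices (each step copies the rest of the list) by a single iterative pass that advances an index pointer over the list, classifying bytes with the same f-string formatting.
import Mathlib
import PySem

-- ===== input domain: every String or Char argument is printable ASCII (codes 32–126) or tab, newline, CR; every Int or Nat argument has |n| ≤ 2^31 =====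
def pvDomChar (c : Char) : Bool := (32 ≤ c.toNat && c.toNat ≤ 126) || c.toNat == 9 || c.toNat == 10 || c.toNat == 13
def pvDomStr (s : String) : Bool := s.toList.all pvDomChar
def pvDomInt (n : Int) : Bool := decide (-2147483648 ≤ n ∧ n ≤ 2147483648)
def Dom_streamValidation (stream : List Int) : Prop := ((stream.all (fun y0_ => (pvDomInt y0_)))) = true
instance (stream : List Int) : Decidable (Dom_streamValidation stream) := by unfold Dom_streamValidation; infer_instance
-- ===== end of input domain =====

-- B replaces A's recursion on suffix-slice copies by a single iterative pass with an
-- index pointer (objective: alternative).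

-- ===== PORT A =====

-- binary digits of a natural number, most significant first ([] for 0)
def pvBits : Nat → List Char
  | 0 => []
  | n+1 => pvBits ((n+1)/2) ++ [if (n+1) % 2 = 1 then '1' else '0']
decreasing_by exact Nat.div_lt_self (Nat.succ_pos n) (by norm_num)

-- f"{n:08b}": sign-magnitude binary, zero-padded to total width 8
def pvFmt08b (n : Int) : List Char :=
  if n < 0 then
    let d := pvBits (-n).toNat
    '-' :: (List.replicate (7 - d.length) '0' ++ d)
  else
    let d := if n = 0 then ['0'] else pvBits n.toNat
    List.replicate (8 - d.length) '0' ++ d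

-- s.find('0'): first index of '0', or -1
def pvFind0 : List Char → Int
  | [] => -1
  | c :: t => if c = '0' then 0 else (if pvFind0 t = -1 then -1 else pvFind0 t + 1)

theorem pvFind0_ge (l : List Char) : -1 ≤ pvFind0 l := by
  induction l with
  | nil => simp [pvFind0]
  | cons c t ih => simp only [pvFind0]; split_ifs <;> omega

def streamValidation : List Int → Bool
  | [] => true
  | h :: t =>
    let head := pvFmt08b h
    let blocks := pvFind0 head
    if hneg : blocks = -1 then false
    else if hz : blocks = 0 then streamValidation t
    else if blocks > ((h :: t).length : Int) then false
    else
      let tail := PySem.List.slice (h :: t) (some 1) (some blocks)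
      if tail = [] then false
      else if tail.all (fun b => (pvFmt08b b).take 2 == ['1', '0']) then
        streamValidation (PySem.List.slice (h :: t) (some blocks) none)
      else false
termination_by s => s.length
decreasing_by
  · simp
  · have e : blocks = pvFind0 (pvFmt08b h) := rfl
    rw [e] at hneg hz
    have h0 : -1 ≤ pvFind0 (pvFmt08b h) := pvFind0_ge _
    rw [PySem.List.slice_from _ (by omega)]
    simp [List.length_drop]
    omega

-- ===== PORT B =====

-- the while-loop of Source B: i is the index pointer, n = len(stream)
def pvGoB (stream : List Int) (n : Nat) (i : Nat) : Bool :=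
  if h : i < n then
    let blocks := pvFind0 (pvFmt08b (PySem.List.pyGetD stream (i : Int) 0))
    if hk : blocks = -1 ∨ blocks = 1 ∨ blocks > (n : Int) - (i : Int) then false
    else if hk0 : blocks = 0 then pvGoB stream n (i + 1)
    else if (PySem.List.pyRange ((i : Int) + 1) ((i : Int) + blocks) 1).any
              (fun j => !((pvFmt08b (PySem.List.pyGetD stream j 0)).take 2 == ['1', '0'])) then
      false
    else pvGoB stream n (i + blocks.toNat)
  else true
termination_by n - i
decreasing_by
  · omega
  · have := pvFind0_ge (pvFmt08b (PySem.List.pyGetD stream (i : Int) 0))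
    omega

def streamValidation_alt (stream : List Int) : Bool :=
  pvGoB stream stream.length 0

-- ===== PRECONDITION & SPEC =====
def Spec_streamValidation (stream : List Int) (out : Bool) : Prop := out = streamValidation_alt stream
instance (stream : List Int) (out : Bool) : Decidable (Spec_streamValidation stream out) := by unfold Spec_streamValidation; infer_instance

-- ===== CLAIM (what is proved, stated in full; the proofs are below) =====
def Claim_equal_streamValidation : Prop := ∀ (stream : List Int), Dom_streamValidation stream → Spec_streamValidation stream (streamValidation stream)

-- ===== LEMMAS AND PROOFS =====

theorem range_all_eq (s : List Int) :
    ∀ (c a : Nat), a + c + 1 ≤ s.length →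
      ((PySem.List.pyRange ((a : Int) + 1) ((a : Int) + 1 + (c : Int)) 1).all
        (fun j => (pvFmt08b (PySem.List.pyGetD s j 0)).take 2 == ['1', '0']))
      = ((s.drop (a + 1)).take c).all (fun b => (pvFmt08b b).take 2 == ['1', '0']) := by
  intro c
  induction c with
  | zero =>
    intro a _
    rw [PySem.List.pyRange_one_eq_nil (by omega)]
    simp
  | succ c ih =>
    intro a hlen
    rw [PySem.List.pyRange_one_cons (by omega)]
    have ha1 : a + 1 < s.length := by omega
    have hget : PySem.List.pyGetD s ((a : Int) + 1) 0 = s[a + 1] := by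
      have hcast : ((a : Int) + 1) = ((a + 1 : Nat) : Int) := by push_cast; ring
      rw [hcast, PySem.List.pyGetD_natCast]
      exact List.getD_eq_getElem s 0 ha1
    rw [List.drop_eq_getElem_cons ha1, List.take_succ_cons, List.all_cons, List.all_cons, hget]
    have hrw : PySem.List.pyRange ((a : Int) + 1 + 1) ((a : Int) + 1 + ((c : Nat) + 1 : Nat)) 1
        = PySem.List.pyRange (((a + 1 : Nat) : Int) + 1) (((a + 1 : Nat) : Int) + 1 + (c : Int)) 1 := by
      congr 1 <;> push_cast <;> ring
    rw [hrw, ih (a + 1) (by omega)]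

theorem any_not_eq_not_all (l : List Int) (p : Int → Bool) :
    (l.any (fun x => !p x)) = !(l.all p) := by
  induction l with
  | nil => rfl
  | cons a t ih => simp [List.any_cons, List.all_cons, ih, Bool.not_and]

theorem loop_eq (s : List Int) :
    ∀ (d i : Nat), s.length - i ≤ d → i ≤ s.length →
      streamValidation (s.drop i) = pvGoB s s.length i := by
  intro d
  induction d with
  | zero =>
    intro i h1 h2
    have hi : i = s.length := by omega
    rw [hi, List.drop_length, streamValidation, pvGoB, dif_neg (by omega : ¬s.length < s.length)]
  | succ d ih =>
    intro i h1 h2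
    by_cases hi : i < s.length
    · have hidx : s.drop i = s[i] :: s.drop (i + 1) := List.drop_eq_getElem_cons hi
      have hget : PySem.List.pyGetD s (i : Int) 0 = s[i] := by
        rw [PySem.List.pyGetD_natCast]
        exact List.getD_eq_getElem s 0 hi
      set k := pvFind0 (pvFmt08b s[i]) with hkdef
      have hge : -1 ≤ k := pvFind0_ge _
      have hlen : (s.drop (i + 1)).length = s.length - (i + 1) := List.length_drop
      rw [hidx, streamValidation, pvGoB, dif_pos hi, hget]
      dsimp only
      rw [← hkdef]
      by_cases hk1 : k = -1
      · rw [dif_pos hk1, dif_pos (Or.inl hk1)]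
      · by_cases hk0 : k = 0
        · rw [dif_neg hk1, dif_pos hk0,
            dif_neg (by omega : ¬(k = -1 ∨ k = 1 ∨ k > (s.length : Int) - (i : Int))),
            dif_pos hk0]
          exact ih (i + 1) (by omega) (by omega)
        · by_cases hklen : k > ((s[i] :: s.drop (i + 1)).length : Int)
          · have hklen' : k > (s.length : Int) - (i : Int) := by
              simp only [List.length_cons, hlen] at hklen
              omega
            rw [dif_neg hk1, dif_neg hk0, if_pos hklen, dif_pos (Or.inr (Or.inr hklen'))]
          · by_cases hkone : k = 1
            · rw [dif_neg hk1, dif_neg hk0, if_neg hklen,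
                PySem.List.slice_toNat _ (by norm_num) (by omega)]
              simp only [Int.toNat_one]
              have ht : ((s[i] :: s.drop (i + 1)).drop 1).take (k.toNat - 1) = [] := by
                rw [hkone]; simp
              simp only [ht]
              rw [if_pos trivial, dif_pos (Or.inr (Or.inl hkone))]
            · -- main multibyte case: 2 ≤ k ≤ len - i
              have hk2 : (2 : Int) ≤ k := by omega
              have hklen' : k ≤ (s.length : Int) - (i : Int) := by
                simp only [List.length_cons, hlen] at hklen
                omega
              rw [dif_neg hk1, dif_neg hk0, if_neg hklen,
                PySem.List.slice_toNat _ (by norm_num) (by omega)]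
              simp only [Int.toNat_one]
              have htail : ((s[i] :: s.drop (i + 1)).drop 1).take (k.toNat - 1)
                  = (s.drop (i + 1)).take (k.toNat - 1) := by simp
              have hne : (s.drop (i + 1)).take (k.toNat - 1) ≠ [] := by
                apply List.ne_nil_of_length_pos
                rw [List.length_take, hlen]
                omega
              simp only [htail]
              rw [if_neg hne,
                dif_neg (by omega : ¬(k = -1 ∨ k = 1 ∨ k > (s.length : Int) - (i : Int))),
                dif_neg hk0]
              have hrange : ((i : Int) + k) = ((i : Int) + 1 + ((k.toNat - 1 : Nat) : Int)) := by
                push_cast; omega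
              have hall : (PySem.List.pyRange ((i : Int) + 1) ((i : Int) + k) 1).all
                    (fun j => (pvFmt08b (PySem.List.pyGetD s j 0)).take 2 == ['1', '0'])
                  = ((s.drop (i + 1)).take (k.toNat - 1)).all
                      (fun b => (pvFmt08b b).take 2 == ['1', '0']) := by
                rw [hrange]
                exact range_all_eq s (k.toNat - 1) i (by omega)
              rw [any_not_eq_not_all, hall]
              have hsl : PySem.List.slice (s[i] :: s.drop (i + 1)) (some k) none
                  = s.drop (i + k.toNat) := by
                rw [PySem.List.slice_from _ (by omega), ← hidx, List.drop_drop]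
              rw [hsl, ih (i + k.toNat) (by omega) (by omega)]
              cases ((s.drop (i + 1)).take (k.toNat - 1)).all
                  (fun b => (pvFmt08b b).take 2 == ['1', '0']) <;> simp
    · have hi' : i = s.length := by omega
      rw [hi', List.drop_length, streamValidation, pvGoB,
        dif_neg (by omega : ¬s.length < s.length)]

-- ===== VERDICT (by name: the statement is the Claim_ definition above) =====
theorem streamValidation_spec : Claim_equal_streamValidation := by
  intro stream _
  unfold Spec_streamValidation streamValidation_alt
  have h := loop_eq stream stream.length 0 (by omega) (by omega)
  simpa using h
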